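-- pv_equiv track=rewrite | github.com/Hipposdata/Algorithm | 프로그래머스/0/181926. 수 조작하기 1/수 조작하기 1.py | solution
-- ===== SOURCE A (Python) =====
-- def solution(n, control):
--     for i in list(control):
--         if i == 'w':
--             n += 1
--         if i == 's':
--             n -= 1
--         if i == 'd':
--             n+= 10
--         if i == 'a':
--             n-=10
--     return n
-- ===== SOURCE B (Python) =====
-- DELTA = {'w': 1, 's': -1, 'd': 10, 'a': -10}
--
-- def solution(n, control):
--     # divide-and-conquer: total delta of a string = total of its two halves
--     def total(s):
--         if len(s) < 2:
--             return DELTA.get(s, 0) if s else 0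
--         m = len(s) // 2
--         return total(s[:m]) + total(s[m:])
--     return n + total(control)
-- ===== Notes on version B (the rewrite author's own statement) =====
-- stated objective: alternative
-- what changed: Replaces A's sequential accumulator loop with four branch tests per character by a divide-and-conquer recursion: the total delta of the command string is computed by splitting it in halves down to single characters, each resolved through a delta table, then summing the halves; correct because the per-character deltas are independent and addition is associative.
import Mathlib
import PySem

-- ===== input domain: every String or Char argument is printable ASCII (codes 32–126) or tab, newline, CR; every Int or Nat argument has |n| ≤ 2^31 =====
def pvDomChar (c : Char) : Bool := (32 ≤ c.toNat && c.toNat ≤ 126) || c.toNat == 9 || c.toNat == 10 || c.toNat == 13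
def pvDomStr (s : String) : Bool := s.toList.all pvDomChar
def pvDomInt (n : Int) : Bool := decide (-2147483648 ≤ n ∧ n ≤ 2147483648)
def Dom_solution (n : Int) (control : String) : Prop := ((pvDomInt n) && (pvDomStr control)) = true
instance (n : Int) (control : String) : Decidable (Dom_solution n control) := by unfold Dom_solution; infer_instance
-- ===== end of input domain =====

-- B replaces A's sequential four-branch accumulator loop by a divide-and-conquer
-- recursion (split in halves, delta table at the leaves); objective: alternative, same cost.


-- ===== PORT A =====
-- for i in list(control): four independent 'if' updates of n
def solution (n : Int) (control : String) : Int :=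
  control.toList.foldl (fun n i =>
    let n := if i == 'w' then n + 1 else n
    let n := if i == 's' then n - 1 else n
    let n := if i == 'd' then n + 10 else n
    let n := if i == 'a' then n - 10 else n
    n) n

-- ===== PORT B =====
-- DELTA = {'w': 1, 's': -1, 'd': 10, 'a': -10}; its keys are one-character strings → List Char keys
def DELTA : PySem.Dict (List Char) Int :=
  PySem.Dict.ofList [(['w'], 1), (['s'], -1), (['d'], 10), (['a'], -10)]

-- total(s): if len(s) < 2: DELTA.get(s, 0) if s else 0; else total(s[:m]) + total(s[m:]), m = len(s)//2
def totalB (s : List Char) : Int :=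
  if s.length < 2 then
    if s = [] then 0 else PySem.Dict.getD DELTA s 0
  else
    totalB (s.take (s.length / 2)) + totalB (s.drop (s.length / 2))
termination_by s.length
decreasing_by
  · simp only [List.length_take]; omega
  · simp only [List.length_drop]; omega

def solution_alt (n : Int) (control : String) : Int :=
  n + totalB control.toList

-- ===== PRECONDITION & SPEC =====
def Spec_solution (n : Int) (control : String) (out : Int) : Prop := out = solution_alt n control
instance (n : Int) (control : String) (out : Int) : Decidable (Spec_solution n control out) := by unfold Spec_solution; infer_instance

-- ===== CLAIM (what is proved, stated in full; the proofs are below) =====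
def Claim_equal_solution : Prop := ∀ (n : Int) (control : String), Dom_solution n control → Spec_solution n control (solution n control)

-- ===== LEMMAS AND PROOFS =====

-- per-character delta (the value totalB gives a singleton)
def deltaC (c : Char) : Int := PySem.Dict.getD DELTA [c] 0

lemma deltaC_other (h : Char) (hw : ¬h = 'w') (hs : ¬h = 's') (hd : ¬h = 'd')
    (ha : ¬h = 'a') : deltaC h = 0 := by
  simp [deltaC, DELTA, PySem.Dict.getD, PySem.Dict.get?, PySem.Dict.ofList, PySem.Dict.empty,
    PySem.Dict.update, PySem.Dict.insert, List.find?,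
    show ('w' == h) = false by simp [Ne.symm hw],
    show ('s' == h) = false by simp [Ne.symm hs],
    show ('d' == h) = false by simp [Ne.symm hd],
    show ('a' == h) = false by simp [Ne.symm ha]]

-- totalB is the sum of the per-character deltas (strong induction on length)
lemma totalB_eq_sum : ∀ (s : List Char), totalB s = (s.map deltaC).sum := by
  intro s
  induction hl : s.length using Nat.strong_induction_on generalizing s with
  | _ k ih =>
  rw [totalB]
  by_cases h2 : s.length < 2
  · interval_cases hk : s.length
    · simp_all [List.eq_nil_of_length_eq_zero hk]
    · obtain ⟨c, rfl⟩ : ∃ c, s = [c] := by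
        cases s with
        | nil => simp at hk
        | cons a t => cases t with
          | nil => exact ⟨a, rfl⟩
          | cons b u => simp at hk
      simp [deltaC]
  · subst hl
    rw [if_neg h2,
      ih _ (by simp only [List.length_take]; omega) _ rfl,
      ih _ (by simp only [List.length_drop]; omega) _ rfl]
    calc ((s.take (s.length / 2)).map deltaC).sum + ((s.drop (s.length / 2)).map deltaC).sum
        = ((s.take (s.length / 2) ++ s.drop (s.length / 2)).map deltaC).sum := by simp
      _ = (s.map deltaC).sum := by rw [List.take_append_drop]

-- closed form of A's accumulator loop
lemma loopA (l : List Char) (n : Int) :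
    l.foldl (fun n i =>
      let n := if i == 'w' then n + 1 else n
      let n := if i == 's' then n - 1 else n
      let n := if i == 'd' then n + 10 else n
      let n := if i == 'a' then n - 10 else n
      n) n
    = n + (l.map deltaC).sum := by
  induction l generalizing n with
  | nil => simp
  | cons h t ih =>
    simp only [List.foldl_cons, List.map_cons, List.sum_cons]
    have hδ : deltaC h = (if h = 'w' then 1 else if h = 's' then -1
        else if h = 'd' then 10 else if h = 'a' then -10 else 0) := by
      split_ifs with hw hs hd ha
      · subst hw; decide
      · subst hs; decide
      · subst hd; decide
      · subst ha; decide
      · exact deltaC_other h hw hs hd ha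
    rw [hδ]
    by_cases hw : h = 'w' <;> by_cases hs : h = 's' <;> by_cases hd : h = 'd' <;>
      by_cases ha : h = 'a' <;> simp_all <;> omega

-- ===== VERDICT (by name: the statement is the Claim_ definition above) =====
theorem solution_spec : Claim_equal_solution := by
  intro n control _
  unfold Spec_solution solution solution_alt
  rw [loopA, totalB_eq_sum]
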